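-- pv_equiv track=rewrite | github.com/AppleYoujatea/OriginalApplePie | 2nd_quarter/week09/Jose/부족한금액계산하기.py | solution
-- ===== SOURCE A (Python) =====
-- def solution(price, money, count):
--     answer = -1
--     counts = 0
--     for i in range(count+1):
--         counts += i
--
--     if money >= counts * price:
--         answer = 0
--     else:
--         answer = counts * price - money
--
--     return answer
-- ===== SOURCE B (Python) =====
-- def solution(price, money, count):
--     n = max(count, 0)
--     return max(price * n * (n + 1) // 2 - money, 0)
-- ===== Notes on version B (the rewrite author's own statement) =====
-- stated objective: faster
-- what changed: Replaces the O(count) summation loop with the closed-form triangular number count*(count+1)//2 and the if/else with max(...,0).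
import Mathlib
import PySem

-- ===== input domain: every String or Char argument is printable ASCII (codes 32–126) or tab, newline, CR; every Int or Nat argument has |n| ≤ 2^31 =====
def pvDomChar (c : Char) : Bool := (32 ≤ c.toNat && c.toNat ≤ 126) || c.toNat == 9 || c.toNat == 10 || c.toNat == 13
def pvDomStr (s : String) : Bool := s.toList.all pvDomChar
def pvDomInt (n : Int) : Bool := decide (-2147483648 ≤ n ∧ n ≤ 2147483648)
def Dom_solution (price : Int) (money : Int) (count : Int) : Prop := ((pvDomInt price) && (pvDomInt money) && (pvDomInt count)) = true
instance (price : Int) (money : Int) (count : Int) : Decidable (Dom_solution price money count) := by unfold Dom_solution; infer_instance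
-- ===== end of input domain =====

-- B replaces A's O(count) summation loop by the closed-form triangular number (O(1)).

-- ===== PORT A =====
def solution (price : Int) (money : Int) (count : Int) : Int :=
  let _answer : Int := -1
  let counts : Int := (PySem.List.pyRange 0 (count + 1) 1).foldl (fun c i => c + i) 0
  let answer : Int := if money ≥ counts * price then 0 else counts * price - money
  answer

-- ===== PORT B =====
def solution_alt (price : Int) (money : Int) (count : Int) : Int :=
  let n : Int := max count 0
  max (PySem.Int.floordiv (price * n * (n + 1)) 2 - money) 0

-- ===== PRECONDITION & SPEC =====
def Spec_solution (price : Int) (money : Int) (count : Int) (out : Int) : Prop := out = solution_alt price money count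
instance (price : Int) (money : Int) (count : Int) (out : Int) : Decidable (Spec_solution price money count out) := by unfold Spec_solution; infer_instance

-- ===== CLAIM (what is proved, stated in full; the proofs are below) =====
def Claim_equal_solution : Prop := ∀ (price : Int) (money : Int) (count : Int), Dom_solution price money count → Spec_solution price money count (solution price money count)

-- ===== LEMMAS AND PROOFS =====

-- the loop's sum: 2 * Σ_{i=0}^{n} i = n*(n+1) for n ≥ 0 (stated doubled to avoid division)
theorem pv_tri (m : Nat) :
    2 * ((PySem.List.pyRange 0 ((m : Int) + 1) 1).foldl (fun c i => c + i) 0) = (m : Int) * ((m : Int) + 1) := by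
  induction m with
  | zero => decide
  | succ k ih =>
      have h : ((k + 1 : Nat) : Int) + 1 = ((k : Int) + 1) + 1 := by push_cast; ring
      rw [h, PySem.List.pyRange_one_succ_right (by positivity)]
      rw [List.foldl_append]
      simp only [List.foldl]
      have hsum : ∀ (l : List Int) (a b : Int), l.foldl (fun c i => c + i) (a + b) = l.foldl (fun c i => c + i) a + b := by
        intro l
        induction l with
        | nil => intro a b; rfl
        | cons x xs ihl => intro a b; simp only [List.foldl]; rw [show a + b + x = a + x + b by ring, ihl]
      push_cast
      push_cast at ih
      nlinarith [ih]

theorem pv_tri_neg (count : Int) (h : count < 0) :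
    (PySem.List.pyRange 0 (count + 1) 1).foldl (fun c i => c + i) 0 = 0 := by
  rw [PySem.List.pyRange_one_eq_nil (by omega)]
  rfl

-- ===== VERDICT (by name: the statement is the Claim_ definition above) =====
theorem solution_spec : Claim_equal_solution := by
  unfold Claim_equal_solution
  intro price money count _
  unfold Spec_solution solution solution_alt
  simp only []
  by_cases hc : count < 0
  · rw [pv_tri_neg count hc]
    have hn : max count 0 = 0 := by omega
    rw [hn]
    have : PySem.Int.floordiv (price * 0 * (0 + 1)) 2 = 0 := by
      rw [PySem.Int.floordiv_eq_ediv_of_pos (by norm_num)]; simp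
    rw [this]
    split_ifs with h <;> omega
  · push_neg at hc
    obtain ⟨m, hm⟩ : ∃ m : Nat, count = (m : Int) := ⟨count.toNat, by omega⟩
    subst hm
    have hn : max (m : Int) 0 = (m : Int) := by omega
    rw [hn]
    have htri := pv_tri m
    set S : Int := (PySem.List.pyRange 0 ((m : Int) + 1) 1).foldl (fun c i => c + i) 0 with hS
    have hfd : PySem.Int.floordiv (price * (m : Int) * ((m : Int) + 1)) 2 = price * S := by
      rw [PySem.Int.floordiv_eq_ediv_of_pos (by norm_num)]
      have : price * (m : Int) * ((m : Int) + 1) = 2 * (price * S) := by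
        rw [show 2 * (price * S) = price * (2 * S) by ring, htri]; ring
      rw [this, Int.mul_ediv_cancel_left _ (by norm_num)]
    rw [hfd]
    have hcomm : S * price = price * S := mul_comm S price
    split_ifs with h <;> omega
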